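-- pv_equiv track=rewrite | github.com/Jiahao-Grinnell/manumission_app | src/shared/text_utils.py | _matching_json_end
-- ===== SOURCE A (Python) =====
-- def _matching_json_end(text: str, start: int) -> int | None:
--     opener = text[start]
--     if opener not in "{[":
--         return None
--
--     stack: list[str] = []
--     in_string = False
--     escaped = False
--     pairs = {"{": "}", "[": "]"}
--
--     for index in range(start, len(text)):
--         char = text[index]
--         if in_string:
--             if escaped:
--                 escaped = False
--             elif char == "\\":
--                 escaped = True
--             elif char == '"':
--                 in_string = False
--             continue
--
--         if char == '"':
--             in_string = True
--             continue
--         if char in pairs: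
--             stack.append(pairs[char])
--             continue
--         if char in "}]":
--             if not stack or char != stack[-1]:
--                 return None
--             stack.pop()
--             if not stack:
--                 return index
--
--     return None
-- ===== SOURCE B (Python) =====
-- def _matching_json_end(text: str, start: int) -> int | None:
--     if text[start] not in "{[":
--         return None
--     pairs = {"{": "}", "[": "]"}
--
--     def scan(i: int) -> int | None:
--         # text[i] is an opener; return the index of its matching closer, or None
--         close = pairs[text[i]]
--         j = i + 1
--         while j < len(text):
--             ch = text[j]
--             if ch == '"':
--                 j += 1
--                 while j < len(text):
--                     if text[j] == "\\":
--                         j += 2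
--                     elif text[j] == '"':
--                         break
--                     else:
--                         j += 1
--                 if j >= len(text):
--                     return None
--                 j += 1
--             elif ch in pairs:
--                 end = scan(j)
--                 if end is None:
--                     return None
--                 j = end + 1
--             elif ch in "}]":
--                 return j if ch == close else None
--             else:
--                 j += 1
--         return None
--
--     return scan(start)
-- ===== Notes on version B (the rewrite author's own statement) =====
-- stated objective: alternative
-- what changed: Replaces A's single loop over an explicit expected-closer stack with in_string/escaped state flags by a recursive-descent scanner: a helper recurses on each nested opener (the call stack replaces the explicit stack) and skips string literals with an inline sub-loop that steps two characters past escapes.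
import Mathlib
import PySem

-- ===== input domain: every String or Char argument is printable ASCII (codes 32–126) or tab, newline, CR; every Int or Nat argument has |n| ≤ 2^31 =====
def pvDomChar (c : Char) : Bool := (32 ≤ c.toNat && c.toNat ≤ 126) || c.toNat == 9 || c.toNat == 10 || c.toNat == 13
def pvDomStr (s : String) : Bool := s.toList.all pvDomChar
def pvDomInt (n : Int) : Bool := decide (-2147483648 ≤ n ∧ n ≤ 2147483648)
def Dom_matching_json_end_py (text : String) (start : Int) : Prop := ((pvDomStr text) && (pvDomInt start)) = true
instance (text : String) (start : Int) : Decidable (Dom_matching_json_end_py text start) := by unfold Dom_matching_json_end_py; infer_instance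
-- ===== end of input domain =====

-- B re-implements the bracket matcher as a recursive-descent scanner (call stack instead of an
-- explicit closer stack); same asymptotic cost, different decomposition.

-- ===== PORT A =====
-- The chars Python's `for index in range(start, len(text)): char = text[index]` visits, in order:
-- for 0 ≤ start a plain suffix; for a negative in-range start Python's negative indexing makes the
-- loop visit the last -start chars and then the whole string (index running start, start+1, …).
def pvIterChars (cs : List Char) (start : Int) : List Char :=
  if start < 0 then cs.drop (cs.length + start).toNat ++ cs else cs.drop start.toNat

-- the for-loop of A: one step per visited char, state = (stack, in_string, escaped), i = current index
def aLoop : List Char → List Char → Bool → Bool → Int → Option Int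
  | [], _, _, _, _ => none
  | c :: rest, stack, inStr, esc, i =>
    if inStr then
      if esc then aLoop rest stack true false (i + 1)
      else if c = '\\' then aLoop rest stack true true (i + 1)
      else if c = '"' then aLoop rest stack false esc (i + 1)
      else aLoop rest stack true esc (i + 1)
    else if c = '"' then aLoop rest stack true esc (i + 1)
    else if c = '{' then aLoop rest ('}' :: stack) inStr esc (i + 1)
    else if c = '[' then aLoop rest (']' :: stack) inStr esc (i + 1)
    else if c = '}' ∨ c = ']' then
      match stack with
      | [] => none
      | top :: s' =>
        if c ≠ top then none
        else if s' = [] then some i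
        else aLoop rest s' inStr esc (i + 1)
    else aLoop rest stack inStr esc (i + 1)

def matching_json_end_py (text : String) (start : Int) : Option Int :=
  match PySem.List.pyGet? text.toList start with
  | none => none            -- text[start] raises IndexError (excluded by Pre_)
  | some opener =>
    if opener = '{' ∨ opener = '[' then
      aLoop (pvIterChars text.toList start) [] false false start
    else none

-- ===== PORT B =====
-- the inner string-skipping while-loop of B: returns (chars after the closing quote, next index),
-- none when the string is unterminated; the subtype bound is only a totality/termination device
def skipStr : (l : List Char) → Int → Option ({r : List Char // r.length < l.length} × Int)
  | [], _ => none
  | c :: rest, j =>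
    if c = '\\' then
      match rest with
      | [] => none
      | _ :: rest' =>
        match skipStr rest' (j + 2) with
        | none => none
        | some (⟨r, hr⟩, j') => some (⟨r, by simp only [List.length_cons]; omega⟩, j')
    else if c = '"' then some (⟨rest, by simp⟩, j + 1)
    else
      match skipStr rest (j + 1) with
      | none => none
      | some (⟨r, hr⟩, j') => some (⟨r, by simp only [List.length_cons]; omega⟩, j')

-- B's scan(i) on the chars after the opener: returns (index of the matching closer, chars after it)
def scanB (close : Char) : (l : List Char) → Int → Option (Int × {r : List Char // r.length < l.length})
  | [], _ => none
  | c :: rest, j =>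
    if c = '"' then
      match skipStr rest (j + 1) with
      | none => none
      | some (⟨r, hr⟩, j') =>
        match scanB close r j' with
        | none => none
        | some (e, ⟨r', hr'⟩) => some (e, ⟨r', by simp only [List.length_cons]; omega⟩)
    else if c = '{' then
      match scanB '}' rest (j + 1) with
      | none => none
      | some (e, ⟨r, hr⟩) =>
        match scanB close r (e + 1) with
        | none => none
        | some (e', ⟨r', hr'⟩) => some (e', ⟨r', by simp only [List.length_cons]; omega⟩)
    else if c = '[' then
      match scanB ']' rest (j + 1) with
      | none => none
      | some (e, ⟨r, hr⟩) =>
        match scanB close r (e + 1) with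
        | none => none
        | some (e', ⟨r', hr'⟩) => some (e', ⟨r', by simp only [List.length_cons]; omega⟩)
    else if c = '}' ∨ c = ']' then
      if c = close then some (j, ⟨rest, by simp⟩) else none
    else
      match scanB close rest (j + 1) with
      | none => none
      | some (e, ⟨r, hr⟩) => some (e, ⟨r, by simp only [List.length_cons]; omega⟩)
  termination_by l _ => l.length
  decreasing_by all_goals (simp only [List.length_cons]; omega)

def matching_json_end_py_alt (text : String) (start : Int) : Option Int :=
  match PySem.List.pyGet? text.toList start with
  | none => none            -- text[start] raises IndexError (excluded by Pre_)
  | some opener =>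
    if opener = '{' then (scanB '}' (pvIterChars text.toList (start + 1)) (start + 1)).map Prod.fst
    else if opener = '[' then (scanB ']' (pvIterChars text.toList (start + 1)) (start + 1)).map Prod.fst
    else none

-- ===== PRECONDITION & SPEC =====
-- Pre_ excludes exactly the inputs where text[start] raises IndexError (start not a valid Python index).
def Pre_matching_json_end_py (text : String) (start : Int) : Prop :=
  PySem.Raise.InRange text.toList.length start
instance (text : String) (start : Int) : Decidable (Pre_matching_json_end_py text start) := by
  unfold Pre_matching_json_end_py; infer_instance

def pvWitness_matching_json_end_py : String × Int := ("{\"a\": [1, 2]}", 0)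

def Spec_matching_json_end_py (text : String) (start : Int) (out : Option Int) : Prop := out = matching_json_end_py_alt text start
instance (text : String) (start : Int) (out : Option Int) : Decidable (Spec_matching_json_end_py text start out) := by unfold Spec_matching_json_end_py; infer_instance

-- ===== CLAIM (what is proved, stated in full; the proofs are below) =====
def Claim_equal_matching_json_end_py : Prop := ∀ (text : String) (start : Int), Dom_matching_json_end_py text start → Pre_matching_json_end_py text start → Spec_matching_json_end_py text start (matching_json_end_py text start)

-- ===== LEMMAS AND PROOFS =====

lemma aLoop_string (n : Nat) : ∀ (l : List Char), l.length ≤ n → ∀ (stack : List Char) (j : Int),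
    aLoop l stack true false j =
      match skipStr l j with
      | none => none
      | some (r, j') => aLoop r.1 stack false false j' := by
  induction n with
  | zero =>
    intro l hl stack j
    have : l = [] := List.eq_nil_of_length_eq_zero (Nat.le_zero.mp hl)
    subst this; simp [aLoop, skipStr]
  | succ n ih =>
    intro l hl stack j
    match l with
    | [] => simp [aLoop, skipStr]
    | c :: rest =>
      by_cases hc : c = '\\'
      · subst hc
        match rest with
        | [] => simp [aLoop, skipStr]
        | d :: rest' =>
          have hlen : rest'.length ≤ n := by
            simp only [List.length_cons] at hl; omega
          have h2 : j + 1 + 1 = j + 2 := by ring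
          rw [skipStr.eq_def]
          rw [show aLoop ('\\' :: d :: rest') stack true false j
                = aLoop rest' stack true false (j + 2) from by simp [aLoop, h2]]
          rw [ih rest' hlen stack (j + 2)]
          cases h : skipStr rest' (j + 2) with
          | none => simp [h]
          | some p => rcases p with ⟨⟨r, hr⟩, j'⟩; simp [h]
      · by_cases hq : c = '"'
        · subst hq
          rw [skipStr.eq_def]
          simp [aLoop, hc]
        · have hlen : rest.length ≤ n := by
            simp only [List.length_cons] at hl; omega
          rw [skipStr.eq_def]
          rw [show aLoop (c :: rest) stack true false j
                = aLoop rest stack true false (j + 1) from by simp [aLoop, hc, hq]]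
          rw [ih rest hlen stack (j + 1)]
          simp only [if_neg hc, if_neg hq]
          cases h : skipStr rest (j + 1) with
          | none => simp
          | some p => rcases p with ⟨⟨r, hr⟩, j'⟩; simp

lemma aLoop_scanB (n : Nat) : ∀ (l : List Char), l.length ≤ n → ∀ (close : Char) (s : List Char) (j : Int),
    aLoop l (close :: s) false false j =
      match scanB close l j with
      | none => none
      | some (e, r) => if s = [] then some e else aLoop r.1 s false false (e + 1) := by
  induction n with
  | zero =>
    intro l hl close s j
    have : l = [] := List.eq_nil_of_length_eq_zero (Nat.le_zero.mp hl)
    subst this; simp [aLoop, scanB]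
  | succ n ih =>
    intro l hl close s j
    match l with
    | [] => simp [aLoop, scanB]
    | c :: rest =>
      have hlen : rest.length ≤ n := by simp only [List.length_cons] at hl; omega
      rw [scanB.eq_def]
      by_cases hq : c = '"'
      · subst hq
        rw [show aLoop ('"' :: rest) (close :: s) false false j
              = aLoop rest (close :: s) true false (j + 1) from by simp [aLoop]]
        rw [aLoop_string rest.length rest le_rfl (close :: s) (j + 1)]
        cases h : skipStr rest (j + 1) with
        | none => simp [h]
        | some p =>
          rcases p with ⟨⟨r, hr⟩, j'⟩
          cases h2 : scanB close r j' with
          | none => simp [h, h2, ih r (by omega) close s j']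
          | some q => rcases q with ⟨e, ⟨r', hr'⟩⟩; simp [h, h2, ih r (by omega) close s j']
      · by_cases ho1 : c = '{'
        · subst ho1
          rw [show aLoop ('{' :: rest) (close :: s) false false j
                = aLoop rest ('}' :: close :: s) false false (j + 1) from by simp [aLoop]]
          rw [ih rest hlen '}' (close :: s) (j + 1)]
          simp only [reduceIte]
          cases h : scanB '}' rest (j + 1) with
          | none => simp
          | some p =>
            rcases p with ⟨e, ⟨r, hr⟩⟩
            cases h2 : scanB close r (e + 1) with
            | none => simp [h2, ih r (by omega) close s (e + 1)]
            | some q => rcases q with ⟨e', ⟨r', hr'⟩⟩; simp [h2, ih r (by omega) close s (e + 1)]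
        · by_cases ho2 : c = '['
          · subst ho2
            rw [show aLoop ('[' :: rest) (close :: s) false false j
                  = aLoop rest (']' :: close :: s) false false (j + 1) from by simp [aLoop]]
            rw [ih rest hlen ']' (close :: s) (j + 1)]
            simp only [reduceIte]
            cases h : scanB ']' rest (j + 1) with
            | none => simp
            | some p =>
              rcases p with ⟨e, ⟨r, hr⟩⟩
              cases h2 : scanB close r (e + 1) with
              | none => simp [h2, ih r (by omega) close s (e + 1)]
              | some q => rcases q with ⟨e', ⟨r', hr'⟩⟩; simp [h2, ih r (by omega) close s (e + 1)]
          · by_cases hcl : c = '}' ∨ c = ']'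
            · by_cases hcc : c = close
              · subst hcc
                rcases hcl with h' | h' <;> subst h' <;> simp [aLoop]
              · simp [aLoop, hq, ho1, ho2, hcl, hcc]
            · rw [show aLoop (c :: rest) (close :: s) false false j
                    = aLoop rest (close :: s) false false (j + 1) from by
                  simp [aLoop, hq, ho1, ho2, hcl]]
              rw [ih rest hlen close s (j + 1)]
              simp only [if_neg hq, if_neg ho1, if_neg ho2, if_neg hcl]
              cases h : scanB close rest (j + 1) with
              | none => simp
              | some p => rcases p with ⟨e, ⟨r, hr⟩⟩; simp



lemma pvIterChars_cons (cs : List Char) (start : Int) (c : Char)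
    (h : PySem.List.pyGet? cs start = some c) :
    pvIterChars cs start = c :: pvIterChars cs (start + 1) := by
  have hrange : PySem.Raise.InRange cs.length start := by
    by_contra hn
    rw [← PySem.List.pyGet?_eq_none_iff] at hn
    simp [hn] at h
  have hr : -(cs.length : Int) ≤ start ∧ start < cs.length := by
    simpa [PySem.Raise.InRange] using hrange
  by_cases h0 : 0 ≤ start
  · rw [PySem.List.pyGet?_of_nonneg _ h0] at h
    have hlt : start.toNat < cs.length := by
      rcases List.getElem?_eq_some_iff.mp h with ⟨hl, _⟩; exact hl
    have hval : cs[start.toNat] = c := (List.getElem?_eq_some_iff.mp h).2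
    unfold pvIterChars
    rw [if_neg (by omega), if_neg (by omega)]
    rw [List.drop_eq_getElem_cons hlt, hval]
    congr 2
    omega
  · have hk1 : 0 < (-start).toNat := by omega
    have hk2 : (-start).toNat ≤ cs.length := by omega
    have hs : start = -(((-start).toNat : Nat) : Int) := by omega
    rw [hs, PySem.List.pyGet?_neg_natCast _ _ hk1 hk2] at h
    have hlt : cs.length - (-start).toNat < cs.length := by omega
    have hval : cs[cs.length - (-start).toNat] = c := (List.getElem?_eq_some_iff.mp h).2
    unfold pvIterChars
    rw [if_pos (by omega)]
    have hdn : (cs.length + start).toNat = cs.length - (-start).toNat := by omega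
    rw [hdn, List.drop_eq_getElem_cons hlt, hval]
    by_cases h1 : start + 1 < 0
    · rw [if_pos h1]
      simp only [List.cons_append]
      have : (cs.length + (start + 1)).toNat = cs.length - (-start).toNat + 1 := by omega
      rw [this]
    · rw [if_neg h1]
      have hm1 : start = -1 := by omega
      subst hm1
      have : cs.length - (-(-1 : Int)).toNat + 1 = cs.length := by omega
      simp only [List.cons_append]
      rw [this, List.drop_length, List.nil_append]
      norm_num

-- ===== VERDICT (by name: the statement is the Claim_ definition above) =====
theorem matching_json_end_py_spec : Claim_equal_matching_json_end_py := by
  intro text start _ hpre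
  unfold Spec_matching_json_end_py matching_json_end_py matching_json_end_py_alt
  cases hc : PySem.List.pyGet? text.toList start with
  | none => rfl
  | some opener =>
    rw [pvIterChars_cons _ _ _ hc]
    by_cases h1 : opener = '{'
    · subst h1
      rw [show aLoop ('{' :: pvIterChars text.toList (start + 1)) [] false false start
            = aLoop (pvIterChars text.toList (start + 1)) ['}'] false false (start + 1) from by
          simp [aLoop]]
      rw [aLoop_scanB (pvIterChars text.toList (start + 1)).length _ le_rfl '}' [] (start + 1)]
      simp only [reduceIte]
      cases h2 : scanB '}' (pvIterChars text.toList (start + 1)) (start + 1) with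
      | none => simp
      | some p => rcases p with ⟨e, r⟩; simp
    · by_cases h2 : opener = '['
      · subst h2
        rw [show aLoop ('[' :: pvIterChars text.toList (start + 1)) [] false false start
              = aLoop (pvIterChars text.toList (start + 1)) [']'] false false (start + 1) from by
            simp [aLoop]]
        rw [aLoop_scanB (pvIterChars text.toList (start + 1)).length _ le_rfl ']' [] (start + 1)]
        simp only [reduceIte]
        cases h3 : scanB ']' (pvIterChars text.toList (start + 1)) (start + 1) with
        | none => simp
        | some p => rcases p with ⟨e, r⟩; simp
      · simp [h1, h2]
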